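-- pv_equiv track=rewrite | github.com/jlib245/AlgorithmStudy | 프로그래머스/1/258712. 가장 많이 받은 선물/가장 많이 받은 선물.py | solution
-- ===== SOURCE A (Python) =====
-- def solution(friends, gifts):
--     lenFriends = len(friends)
--     expect = [0]*len(friends)
--     giftScore = []
--     giftTable = [[0]*lenFriends for i in range(lenFriends)]
--     friendsNumber = {}
--     # friends 리스트랑 넘버 뒤집어 놨는데 이게 맞을지..??
--     for i in range(lenFriends):
--         friendsNumber[friends[i]] = i
--     # 선물 준 것을 왼쪽 표로 나타낸 것.
--     for i in gifts:
--         transGift = i.split()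
--         giftTable[friendsNumber[transGift[0]]][friendsNumber[transGift[1]]] += 1
--     # 선물 지수 계산 및 입력.
--     for i in range(lenFriends):
--         sendScore = 0
--         receiveScore = 0
--         for j in range(lenFriends):
--             sendScore += giftTable[i][j]
--         for j in range(lenFriends):
--             receiveScore += giftTable[j][i]
--         giftScore.append(sendScore - receiveScore)
--     # 다음 달 예상하기
--     for i in range(lenFriends):
--         for j in range(lenFriends):
--             if i != j:
--                 sendRecord = giftTable[i][j]
--                 receiveRecord = giftTable[j][i]
--                 if sendRecord < receiveRecord:
--                     expect[j] += 1
--                 elif sendRecord == receiveRecord and giftScore[i] < giftScore[j]: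
--                     expect[j] += 1
--     # 많이 받을 사람 체크
--     answer = max(expect)
--     return answer
-- ===== SOURCE B (Python) =====
-- def solution(friends, gifts):
--     n = len(friends)
--     idx = {f: i for i, f in enumerate(friends)}
--     cnt = {}
--     given = [0] * n
--     received = [0] * n
--     pairs = set()
--     for g in gifts:
--         t = g.split()
--         a, b = idx[t[0]], idx[t[1]]
--         cnt[(a, b)] = cnt.get((a, b), 0) + 1
--         given[a] += 1
--         received[b] += 1
--         if a != b:
--             pairs.add((a, b) if a < b else (b, a))
--     score = [given[i] - received[i] for i in range(n)]
--     # Bulk phase: one sort gives every friend the number of strictly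
--     # lower-scoring friends -- the wins it would collect if nobody had
--     # exchanged any gift (then every duel is decided by score alone).
--     order = sorted(range(n), key=lambda i: score[i])
--     wins = [0] * n
--     j = 0
--     prev = None
--     pos = 0
--     for i in order:
--         if prev is not None and score[i] != prev:
--             j = pos
--         prev = score[i]
--         wins[i] = j
--         pos += 1
--     # Correction phase: only pairs that actually exchanged gifts can
--     # deviate from the score-only prediction; fix exactly those.
--     for (a, b) in pairs:
--         ab = cnt.get((a, b), 0)
--         ba = cnt.get((b, a), 0)
--         if score[a] > score[b]:
--             wins[a] -= 1
--         elif score[b] > score[a]: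
--             wins[b] -= 1
--         if ab > ba:
--             wins[a] += 1
--         elif ba > ab:
--             wins[b] += 1
--         elif score[a] > score[b]:
--             wins[a] += 1
--         elif score[b] > score[a]:
--             wins[b] += 1
--     return max(wins)
-- ===== Notes on version B (the rewrite author's own statement) =====
-- stated objective: faster
-- what changed: Replaces A's O(n^2) all-pairs duel loop over an n-by-n table by a sort-based bulk phase (one sort of friends by net score gives each friend its number of strictly lower-scoring friends, i.e. its wins if no pair had exchanged gifts) plus a correction pass over only the pairs that actually exchanged gifts, read from a pair-keyed dict built in one pass over gifts.
import Mathlib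
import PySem

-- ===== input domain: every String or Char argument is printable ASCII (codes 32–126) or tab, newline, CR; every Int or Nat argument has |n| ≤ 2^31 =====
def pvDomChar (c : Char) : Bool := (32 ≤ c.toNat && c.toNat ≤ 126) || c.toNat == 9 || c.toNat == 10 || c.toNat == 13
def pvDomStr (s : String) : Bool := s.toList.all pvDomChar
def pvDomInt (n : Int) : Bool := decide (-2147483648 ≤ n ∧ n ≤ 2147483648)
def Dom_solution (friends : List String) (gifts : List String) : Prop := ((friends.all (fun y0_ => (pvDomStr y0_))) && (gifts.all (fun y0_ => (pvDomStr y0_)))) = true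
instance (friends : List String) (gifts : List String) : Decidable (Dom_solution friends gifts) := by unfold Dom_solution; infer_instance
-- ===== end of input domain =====

-- B replaces A's O(n^2) all-pairs duel loop over an n×n table by a sort-based bulk
-- phase (one sort of the friends by net gift score gives each friend the number of
-- strictly lower-scoring friends — its wins if no pair had exchanged gifts) plus a
-- correction pass over only the pairs that actually exchanged gifts, read from a
-- pair-keyed count dict built in one pass over gifts: O((n+g) log n) work instead of O(n^2+g).

-- ===== PORT A =====
def solution (friends : List String) (gifts : List String) : Int :=
  let lenFriends : Int := (friends.length : Int)
  let expect : List Int := PySem.List.pyRepeat [(0 : Int)] lenFriends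
  let giftTable : List (List Int) :=
    (PySem.List.pyRange 0 lenFriends 1).map (fun _ => PySem.List.pyRepeat [(0 : Int)] lenFriends)
  let friendsNumber : PySem.Dict String Int :=
    (PySem.List.pyRange 0 lenFriends 1).foldl
      (fun d i => d.insert (PySem.List.pyGetD friends i "") i) PySem.Dict.empty
  let giftTable := gifts.foldl (fun T g =>
      let transGift := PySem.Str.split₀ g
      let a := friendsNumber.getD (PySem.List.pyGetD transGift 0 "") 0
      let b := friendsNumber.getD (PySem.List.pyGetD transGift 1 "") 0
      PySem.List.pySetD T a
        (PySem.List.pySetD (PySem.List.pyGetD T a []) b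
          (PySem.List.pyGetD (PySem.List.pyGetD T a []) b 0 + 1))) giftTable
  let giftScore : List Int :=
    (PySem.List.pyRange 0 lenFriends 1).foldl (fun gs i =>
      let sendScore := (PySem.List.pyRange 0 lenFriends 1).foldl
        (fun s j => s + PySem.List.pyGetD (PySem.List.pyGetD giftTable i []) j 0) 0
      let receiveScore := (PySem.List.pyRange 0 lenFriends 1).foldl
        (fun s j => s + PySem.List.pyGetD (PySem.List.pyGetD giftTable j []) i 0) 0
      gs ++ [sendScore - receiveScore]) []
  let expect := (PySem.List.pyRange 0 lenFriends 1).foldl (fun e i =>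
      (PySem.List.pyRange 0 lenFriends 1).foldl (fun e j =>
        if i ≠ j then
          let sendRecord := PySem.List.pyGetD (PySem.List.pyGetD giftTable i []) j 0
          let receiveRecord := PySem.List.pyGetD (PySem.List.pyGetD giftTable j []) i 0
          if sendRecord < receiveRecord then
            PySem.List.pySetD e j (PySem.List.pyGetD e j 0 + 1)
          else if sendRecord = receiveRecord ∧
              PySem.List.pyGetD giftScore i 0 < PySem.List.pyGetD giftScore j 0 then
            PySem.List.pySetD e j (PySem.List.pyGetD e j 0 + 1)
          else e
        else e) e) expect
  (PySem.List.max? expect (fun y => y)).getD 0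

-- ===== PORT B =====
def solution_alt (friends : List String) (gifts : List String) : Int :=
  let n : Int := (friends.length : Int)
  let idx : PySem.Dict String Int :=
    (PySem.List.enumerate friends 0).foldl (fun d p => d.insert p.2 p.1) PySem.Dict.empty
  -- one pass over gifts: pair counts, given/received counters, set of exchanged pairs
  let st : PySem.Dict (Int × Int) Int × List Int × List Int × PySem.Set (Int × Int) :=
    gifts.foldl (fun st g =>
      let t := PySem.Str.split₀ g
      let a := idx.getD (PySem.List.pyGetD t 0 "") 0
      let b := idx.getD (PySem.List.pyGetD t 1 "") 0
      (st.1.modify (a, b) 0 (· + 1),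
       PySem.List.pySetD st.2.1 a (PySem.List.pyGetD st.2.1 a 0 + 1),
       PySem.List.pySetD st.2.2.1 b (PySem.List.pyGetD st.2.2.1 b 0 + 1),
       if a ≠ b then PySem.Set.add st.2.2.2 (if a < b then (a, b) else (b, a)) else st.2.2.2))
      (PySem.Dict.empty,
       PySem.List.pyRepeat [(0 : Int)] n,
       PySem.List.pyRepeat [(0 : Int)] n,
       PySem.Set.empty)
  let cnt := st.1
  let score : List Int := (PySem.List.pyRange 0 n 1).map
    (fun i => PySem.List.pyGetD st.2.1 i 0 - PySem.List.pyGetD st.2.2.1 i 0)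
  -- bulk phase: sort by score; wins[i] := number of strictly lower-scoring friends
  let order := PySem.List.sorted (PySem.List.pyRange 0 n 1)
    (fun i => PySem.List.pyGetD score i 0) false
  let rk := order.foldl (fun s i =>
      let j := if s.2.2.1 ≠ none ∧ some (PySem.List.pyGetD score i 0) ≠ s.2.2.1 then s.2.2.2
               else s.2.1
      (PySem.List.pySetD s.1 i j, j, some (PySem.List.pyGetD score i 0), s.2.2.2 + 1))
      (PySem.List.pyRepeat [(0 : Int)] n, (0 : Int), (none : Option Int), (0 : Int))
  -- correction phase: only pairs that exchanged gifts can deviate from score order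
  let wins := st.2.2.2.foldl (fun w p =>
      let w := if PySem.List.pyGetD score p.2 0 < PySem.List.pyGetD score p.1 0 then
                 PySem.List.pySetD w p.1 (PySem.List.pyGetD w p.1 0 - 1)
               else if PySem.List.pyGetD score p.1 0 < PySem.List.pyGetD score p.2 0 then
                 PySem.List.pySetD w p.2 (PySem.List.pyGetD w p.2 0 - 1)
               else w
      if cnt.getD (p.2, p.1) 0 < cnt.getD (p.1, p.2) 0 then
        PySem.List.pySetD w p.1 (PySem.List.pyGetD w p.1 0 + 1)
      else if cnt.getD (p.1, p.2) 0 < cnt.getD (p.2, p.1) 0 then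
        PySem.List.pySetD w p.2 (PySem.List.pyGetD w p.2 0 + 1)
      else if PySem.List.pyGetD score p.2 0 < PySem.List.pyGetD score p.1 0 then
        PySem.List.pySetD w p.1 (PySem.List.pyGetD w p.1 0 + 1)
      else if PySem.List.pyGetD score p.1 0 < PySem.List.pyGetD score p.2 0 then
        PySem.List.pySetD w p.2 (PySem.List.pyGetD w p.2 0 + 1)
      else w) rk.1
  (PySem.List.max? wins (fun y => y)).getD 0

-- ===== PRECONDITION & SPEC =====
-- Pre_ excludes exactly the inputs where A raises: empty friends (max of an empty list,
-- ValueError), a gift with fewer than two whitespace-separated tokens (IndexError), or a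
-- gift naming someone not in friends (KeyError).
def Pre_solution (friends : List String) (gifts : List String) : Prop :=
  friends ≠ [] ∧ ∀ g ∈ gifts,
    2 ≤ (PySem.Str.split₀ g).length ∧
    (PySem.Str.split₀ g).getD 0 "" ∈ friends ∧
    (PySem.Str.split₀ g).getD 1 "" ∈ friends
instance (friends : List String) (gifts : List String) : Decidable (Pre_solution friends gifts) := by
  unfold Pre_solution; infer_instance

def pvWitness_solution : List String × List String := (["a", "b"], ["a b"])

def Spec_solution (friends : List String) (gifts : List String) (out : Int) : Prop := out = solution_alt friends gifts
instance (friends : List String) (gifts : List String) (out : Int) : Decidable (Spec_solution friends gifts out) := by unfold Spec_solution; infer_instance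

-- ===== CLAIM (what is proved, stated in full; the proofs are below) =====
def Claim_equal_solution : Prop := ∀ (friends : List String) (gifts : List String), Dom_solution friends gifts → Pre_solution friends gifts → Spec_solution friends gifts (solution friends gifts)

-- ===== LEMMAS AND PROOFS =====

-- Proof-side canonical names for the intermediate values of both ports.
def pvN (friends : List String) : Int := (friends.length : Int)

def pvFn (friends : List String) : PySem.Dict String Int :=
  (PySem.List.pyRange 0 (pvN friends) 1).foldl
    (fun d i => d.insert (PySem.List.pyGetD friends i "") i) PySem.Dict.empty

def pvIdx (friends : List String) : PySem.Dict String Int :=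
  (PySem.List.enumerate friends 0).foldl (fun d p => d.insert p.2 p.1) PySem.Dict.empty

def pvKey (friends : List String) (g : String) : Int × Int :=
  ((pvFn friends).getD (PySem.List.pyGetD (PySem.Str.split₀ g) 0 "") 0,
   (pvFn friends).getD (PySem.List.pyGetD (PySem.Str.split₀ g) 1 "") 0)

def pvNorm (p : Int × Int) : Int × Int := if p.1 < p.2 then p else (p.2, p.1)

def pvC (friends gifts : List String) (i j : Int) : Int :=
  (gifts.countP (fun g => pvKey friends g == (i, j)) : Int)
def pvGiven (friends gifts : List String) (i : Int) : Int :=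
  (gifts.countP (fun g => (pvKey friends g).1 == i) : Int)
def pvRecv (friends gifts : List String) (i : Int) : Int :=
  (gifts.countP (fun g => (pvKey friends g).2 == i) : Int)
def pvScore (friends gifts : List String) (i : Int) : Int :=
  pvGiven friends gifts i - pvRecv friends gifts i

def pvTable0 (friends : List String) : List (List Int) :=
  (PySem.List.pyRange 0 (pvN friends) 1).map (fun _ => PySem.List.pyRepeat [(0 : Int)] (pvN friends))

def pvTable (friends gifts : List String) : List (List Int) :=
  gifts.foldl (fun T g =>
    PySem.List.pySetD T (pvKey friends g).1
      (PySem.List.pySetD (PySem.List.pyGetD T (pvKey friends g).1 []) (pvKey friends g).2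
        (PySem.List.pyGetD (PySem.List.pyGetD T (pvKey friends g).1 []) (pvKey friends g).2 0 + 1)))
    (pvTable0 friends)

def pvScoreA (friends gifts : List String) : List Int :=
  (PySem.List.pyRange 0 (pvN friends) 1).foldl (fun gs i =>
    gs ++ [(PySem.List.pyRange 0 (pvN friends) 1).foldl
             (fun s j => s + PySem.List.pyGetD (PySem.List.pyGetD (pvTable friends gifts) i []) j 0) 0
           - (PySem.List.pyRange 0 (pvN friends) 1).foldl
             (fun s j => s + PySem.List.pyGetD (PySem.List.pyGetD (pvTable friends gifts) j []) i 0) 0]) []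

def pvExpectA (friends gifts : List String) : List Int :=
  (PySem.List.pyRange 0 (pvN friends) 1).foldl (fun e i =>
    (PySem.List.pyRange 0 (pvN friends) 1).foldl (fun e j =>
      if i ≠ j then
        if PySem.List.pyGetD (PySem.List.pyGetD (pvTable friends gifts) i []) j 0
            < PySem.List.pyGetD (PySem.List.pyGetD (pvTable friends gifts) j []) i 0 then
          PySem.List.pySetD e j (PySem.List.pyGetD e j 0 + 1)
        else if PySem.List.pyGetD (PySem.List.pyGetD (pvTable friends gifts) i []) j 0
              = PySem.List.pyGetD (PySem.List.pyGetD (pvTable friends gifts) j []) i 0 ∧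
            PySem.List.pyGetD (pvScoreA friends gifts) i 0 < PySem.List.pyGetD (pvScoreA friends gifts) j 0 then
          PySem.List.pySetD e j (PySem.List.pyGetD e j 0 + 1)
        else e
      else e) e) (PySem.List.pyRepeat [(0 : Int)] (pvN friends))

-- B-side canonical names.
def pvStB (friends gifts : List String) :
    PySem.Dict (Int × Int) Int × List Int × List Int × PySem.Set (Int × Int) :=
  gifts.foldl (fun st g =>
    let t := PySem.Str.split₀ g
    let a := (pvIdx friends).getD (PySem.List.pyGetD t 0 "") 0
    let b := (pvIdx friends).getD (PySem.List.pyGetD t 1 "") 0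
    (st.1.modify (a, b) 0 (· + 1),
     PySem.List.pySetD st.2.1 a (PySem.List.pyGetD st.2.1 a 0 + 1),
     PySem.List.pySetD st.2.2.1 b (PySem.List.pyGetD st.2.2.1 b 0 + 1),
     if a ≠ b then PySem.Set.add st.2.2.2 (if a < b then (a, b) else (b, a)) else st.2.2.2))
    (PySem.Dict.empty,
     PySem.List.pyRepeat [(0 : Int)] (pvN friends),
     PySem.List.pyRepeat [(0 : Int)] (pvN friends),
     PySem.Set.empty)

def pvScoreB (friends gifts : List String) : List Int :=
  (PySem.List.pyRange 0 (pvN friends) 1).map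
    (fun i => PySem.List.pyGetD (pvStB friends gifts).2.1 i 0
      - PySem.List.pyGetD (pvStB friends gifts).2.2.1 i 0)

def pvF (friends gifts : List String) (i : Int) : Int :=
  PySem.List.pyGetD (pvScoreB friends gifts) i 0

def pvOrder (friends gifts : List String) : List Int :=
  PySem.List.sorted (PySem.List.pyRange 0 (pvN friends) 1) (pvF friends gifts) false

def pvRankStep (f : Int → Int) (s : List Int × Int × Option Int × Int) (i : Int) :
    List Int × Int × Option Int × Int :=
  let j := if s.2.2.1 ≠ none ∧ some (f i) ≠ s.2.2.1 then s.2.2.2 else s.2.1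
  (PySem.List.pySetD s.1 i j, j, some (f i), s.2.2.2 + 1)

def pvRk (friends gifts : List String) : List Int × Int × Option Int × Int :=
  (pvOrder friends gifts).foldl (pvRankStep (pvF friends gifts))
    (PySem.List.pyRepeat [(0 : Int)] (pvN friends), (0 : Int), (none : Option Int), (0 : Int))

def pvP (friends gifts : List String) : PySem.Set (Int × Int) :=
  (pvStB friends gifts).2.2.2

def pvCorrStep (f : Int → Int) (c : Int → Int → Int) (w : List Int) (p : Int × Int) : List Int :=
  let w := if f p.2 < f p.1 then
             PySem.List.pySetD w p.1 (PySem.List.pyGetD w p.1 0 - 1)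
           else if f p.1 < f p.2 then
             PySem.List.pySetD w p.2 (PySem.List.pyGetD w p.2 0 - 1)
           else w
  if c p.2 p.1 < c p.1 p.2 then PySem.List.pySetD w p.1 (PySem.List.pyGetD w p.1 0 + 1)
  else if c p.1 p.2 < c p.2 p.1 then PySem.List.pySetD w p.2 (PySem.List.pyGetD w p.2 0 + 1)
  else if f p.2 < f p.1 then PySem.List.pySetD w p.1 (PySem.List.pyGetD w p.1 0 + 1)
  else if f p.1 < f p.2 then PySem.List.pySetD w p.2 (PySem.List.pyGetD w p.2 0 + 1)
  else w

def pvWinsB (friends gifts : List String) : List Int :=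
  (pvP friends gifts).foldl
    (pvCorrStep (pvF friends gifts) (fun i j => (pvStB friends gifts).1.getD (i, j) 0))
    (pvRk friends gifts).1

-- per-pair indicators used in the proofs
def pvDA (friends gifts : List String) (i j k : Int) : Int :=
  if i ≠ j ∧ (pvC friends gifts i j < pvC friends gifts j i ∨
      (pvC friends gifts i j = pvC friends gifts j i ∧
        pvScore friends gifts i < pvScore friends gifts j)) ∧ j = k
  then 1 else 0

def pvSd (friends gifts : List String) (i j k : Int) : Int :=
  if pvScore friends gifts i < pvScore friends gifts j ∧ j = k then 1 else 0

def pvDC (friends gifts : List String) (p : Int × Int) (k : Int) : Int :=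
  pvDA friends gifts p.1 p.2 k + pvDA friends gifts p.2 p.1 k
    - pvSd friends gifts p.1 p.2 k - pvSd friends gifts p.2 p.1 k

lemma pv_solution_eq (friends gifts : List String) :
    solution friends gifts = (PySem.List.max? (pvExpectA friends gifts) (fun y => y)).getD 0 := rfl

lemma pv_solution_alt_eq (friends gifts : List String) :
    solution_alt friends gifts = (PySem.List.max? (pvWinsB friends gifts) (fun y => y)).getD 0 := rfl

lemma pv_pyGetD_pySetD {β : Type} (xs : List β) (a i : Int) (v d : β)
    (h0 : 0 ≤ a) (hi0 : 0 ≤ i) (hi : i < (xs.length : Int)) :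
    PySem.List.pyGetD (PySem.List.pySetD xs a v) i d
      = if i = a then v else PySem.List.pyGetD xs i d := by
  rw [PySem.List.pySetD_of_nonneg (xs := xs) (v := v) h0]
  rw [PySem.List.pyGetD_eq_getElem _ _ hi0 (by simpa using hi)]
  rw [List.getElem_set]
  by_cases h : i = a
  · rw [if_pos (by omega), if_pos h]
  · rw [if_neg (by omega), if_neg h, PySem.List.pyGetD_eq_getElem _ _ hi0 hi]

lemma pv_foldl_len {α : Type} (step : List Int → α → List Int)
    (hlen : ∀ e x, (step e x).length = e.length) :
    ∀ (L : List α) (init : List Int), (L.foldl step init).length = init.length := by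
  intro L
  induction L with
  | nil => intro init; rfl
  | cons x L ih => intro init; simp only [List.foldl_cons]; rw [ih, hlen]

lemma pv_foldl_delta {α : Type} (n : Nat) (step : List Int → α → List Int) (δ : α → Int → Int)
    (hlen : ∀ e x, (step e x).length = e.length) :
    ∀ (L : List α),
      (∀ (e : List Int) (x : α) (k : Int), e.length = n → x ∈ L → 0 ≤ k → k < (n : Int) →
        PySem.List.pyGetD (step e x) k 0 = PySem.List.pyGetD e k 0 + δ x k) →
      ∀ (init : List Int) (k : Int), init.length = n → 0 ≤ k → k < (n : Int) →
        PySem.List.pyGetD (L.foldl step init) k 0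
          = PySem.List.pyGetD init k 0 + (L.map (fun x => δ x k)).sum := by
  intro L
  induction L with
  | nil => intro _ init k _ _ _; simp
  | cons x L ih =>
    intro hstep init k hinit hk0 hkn
    simp only [List.foldl_cons, List.map_cons, List.sum_cons]
    rw [ih (fun e y k he hy => hstep e y k he (List.mem_cons_of_mem _ hy))
        (step init x) k (by rw [hlen]; exact hinit) hk0 hkn]
    rw [hstep init x k hinit (List.mem_cons_self) hk0 hkn]
    ring

lemma pv_idx_eq (friends : List String) : pvIdx friends = pvFn friends := by
  unfold pvIdx pvFn pvN
  rw [PySem.List.enumerate_eq_map_pyRange friends "", List.foldl_map]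
  simp [PySem.List.len_eq]

lemma pv_fn_get?_bound (friends : List String) (s : String) (v : Int)
    (h : (pvFn friends).get? s = some v) : 0 ≤ v ∧ v < pvN friends := by
  have H : ∀ (L : List Int) (d : PySem.Dict String Int),
      (∀ s v, d.get? s = some v → 0 ≤ v ∧ v < pvN friends) →
      (∀ i ∈ L, 0 ≤ i ∧ i < pvN friends) →
      ∀ s v, (L.foldl (fun d i => d.insert (PySem.List.pyGetD friends i "") i) d).get? s = some v →
        0 ≤ v ∧ v < pvN friends := by
    intro L
    induction L with
    | nil => intro d hd _ s v hv; exact hd s v hv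
    | cons i L ih =>
      intro d hd hL s v hv
      refine ih _ ?_ (fun j hj => hL j (List.mem_cons_of_mem _ hj)) s v hv
      intro s' v' h'
      rw [PySem.Dict.get?_insert] at h'
      by_cases hc : s' = PySem.List.pyGetD friends i ""
      · rw [if_pos hc] at h'
        cases h'
        exact hL i List.mem_cons_self
      · rw [if_neg hc] at h'
        exact hd s' v' h'
  refine H _ _ (fun s v hv => by simp [PySem.Dict.get?_empty] at hv) ?_ s v h
  intro i hi
  rw [PySem.List.mem_pyRange_one] at hi
  exact hi

lemma pv_fn_getD_bound (friends : List String) (s : String) (hs : s ∈ friends) :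
    0 ≤ (pvFn friends).getD s 0 ∧ (pvFn friends).getD s 0 < pvN friends := by
  have hc : (pvFn friends).contains s = true := by
    rw [PySem.Dict.contains_iff_mem_keys]
    unfold pvFn
    rw [PySem.Dict.keys_foldl_insert_key _ (fun i => PySem.List.pyGetD friends i "")
        (fun _ i => i) PySem.Dict.empty]
    have : (PySem.List.pyRange 0 (pvN friends)).map (fun i => PySem.List.pyGetD friends i "") = friends := by
      exact PySem.List.map_pyGetD_pyRange_zero' friends ""
    rw [PySem.Dict.keys_empty, this]
    rw [PySem.Set.mem_update]
    exact Or.inr hs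
  rw [PySem.Dict.contains_eq_isSome_get?] at hc
  obtain ⟨v, hv⟩ := Option.isSome_iff_exists.mp hc
  rw [PySem.Dict.getD_eq_get?_getD, hv]
  exact pv_fn_get?_bound friends s v hv

lemma pv_key_bound (friends gifts : List String) (hpre : Pre_solution friends gifts) :
    ∀ g ∈ gifts, (0 ≤ (pvKey friends g).1 ∧ (pvKey friends g).1 < pvN friends) ∧
      (0 ≤ (pvKey friends g).2 ∧ (pvKey friends g).2 < pvN friends) := by
  intro g hg
  obtain ⟨-, hall⟩ := hpre
  obtain ⟨-, h0, h1⟩ := hall g hg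
  constructor
  · have : PySem.List.pyGetD (PySem.Str.split₀ g) 0 "" = (PySem.Str.split₀ g).getD 0 "" :=
      PySem.List.pyGetD_zero _ _
    unfold pvKey
    simp only [this]
    exact pv_fn_getD_bound friends _ h0
  · have : PySem.List.pyGetD (PySem.Str.split₀ g) 1 "" = (PySem.Str.split₀ g).getD 1 "" := by
      rw [show (1 : Int) = ((1 : Nat) : Int) from rfl, PySem.List.pyGetD_natCast]
    unfold pvKey
    simp only [this]
    exact pv_fn_getD_bound friends _ h1

lemma pv_table0_len (friends : List String) : (pvTable0 friends).length = friends.length := by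
  unfold pvTable0 pvN
  simp [PySem.List.length_pyRange_one]

lemma pv_table0_row (friends : List String) : ∀ r ∈ pvTable0 friends, r.length = friends.length := by
  intro r hr
  unfold pvTable0 pvN at hr
  rw [List.mem_map] at hr
  obtain ⟨i, -, rfl⟩ := hr
  rw [PySem.List.pyRepeat_singleton]
  simp

lemma pv_table0_mem (friends : List String) :
    ∀ r ∈ pvTable0 friends, r = PySem.List.pyRepeat [(0 : Int)] (pvN friends) := by
  intro r hr
  unfold pvTable0 at hr
  rw [List.mem_map] at hr
  obtain ⟨x, -, h⟩ := hr
  exact h.symm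

lemma pv_table0_entry (friends : List String) (i j : Int)
    (hi0 : 0 ≤ i) (hi : i < pvN friends) (hj0 : 0 ≤ j) (hj : j < pvN friends) :
    PySem.List.pyGetD (PySem.List.pyGetD (pvTable0 friends) i []) j 0 = 0 := by
  have hlen : ((pvTable0 friends).length : Int) = pvN friends := by
    rw [pv_table0_len]; rfl
  have hrow : PySem.List.pyGetD (pvTable0 friends) i [] ∈ pvTable0 friends := by
    rw [PySem.List.pyGetD_eq_getElem _ _ hi0 (by omega)]
    exact List.getElem_mem _
  have hrlen : (PySem.List.pyGetD (pvTable0 friends) i []).length = friends.length :=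
    pv_table0_row friends _ hrow
  rw [PySem.List.pyGetD_eq_getElem _ _ hj0 (by rw [hrlen]; exact_mod_cast hj)]
  simp only [pv_table0_mem friends _ hrow, PySem.List.pyRepeat_singleton,
    List.getElem_replicate]

lemma pv_table_char (friends gifts : List String) (hpre : Pre_solution friends gifts) :
    ∀ i j : Int, 0 ≤ i → i < pvN friends → 0 ≤ j → j < pvN friends →
      PySem.List.pyGetD (PySem.List.pyGetD (pvTable friends gifts) i []) j 0
        = pvC friends gifts i j := by
  have key := pv_key_bound friends gifts hpre
  have H : ∀ (L : List String),
      (∀ g ∈ L, (0 ≤ (pvKey friends g).1 ∧ (pvKey friends g).1 < pvN friends) ∧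
        (0 ≤ (pvKey friends g).2 ∧ (pvKey friends g).2 < pvN friends)) →
      ∀ (T : List (List Int)), T.length = friends.length →
        (∀ r ∈ T, r.length = friends.length) →
      ∀ i j : Int, 0 ≤ i → i < pvN friends → 0 ≤ j → j < pvN friends →
        PySem.List.pyGetD (PySem.List.pyGetD
          (L.foldl (fun T g =>
            PySem.List.pySetD T (pvKey friends g).1
              (PySem.List.pySetD (PySem.List.pyGetD T (pvKey friends g).1 []) (pvKey friends g).2
                (PySem.List.pyGetD (PySem.List.pyGetD T (pvKey friends g).1 []) (pvKey friends g).2 0 + 1))) T)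
          i []) j 0
        = PySem.List.pyGetD (PySem.List.pyGetD T i []) j 0
          + (L.countP (fun g => pvKey friends g == (i, j)) : Int) := by
    intro L
    induction L with
    | nil => intro _ T _ _ i j _ _ _ _; simp
    | cons g L ih =>
      intro hb T hTlen hTrow i j hi0 hi hj0 hj
      obtain ⟨⟨ha0, han⟩, ⟨hb0, hbn⟩⟩ := hb g List.mem_cons_self
      have hTlenI : (T.length : Int) = pvN friends := by rw [hTlen]; rfl
      have hrowmem : PySem.List.pyGetD T (pvKey friends g).1 [] ∈ T := by
        rw [PySem.List.pyGetD_eq_getElem _ _ ha0 (by omega)]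
        exact List.getElem_mem _
      have hrowlen : (PySem.List.pyGetD T (pvKey friends g).1 []).length = friends.length :=
        hTrow _ hrowmem
      have hrowlenI : ((PySem.List.pyGetD T (pvKey friends g).1 []).length : Int) = pvN friends := by
        rw [hrowlen]; rfl
      set T' := PySem.List.pySetD T (pvKey friends g).1
          (PySem.List.pySetD (PySem.List.pyGetD T (pvKey friends g).1 []) (pvKey friends g).2
            (PySem.List.pyGetD (PySem.List.pyGetD T (pvKey friends g).1 []) (pvKey friends g).2 0 + 1)) with hT'
      have hT'len : T'.length = friends.length := by
        rw [hT', PySem.List.length_pySetD, hTlen]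
      have hT'row : ∀ r ∈ T', r.length = friends.length := by
        intro r hr
        rw [hT', PySem.List.pySetD_of_nonneg _ _ ha0] at hr
        rcases List.mem_or_eq_of_mem_set hr with h | h
        · exact hTrow r h
        · rw [h, PySem.List.length_pySetD]; exact hrowlen
      have hstep : PySem.List.pyGetD (PySem.List.pyGetD T' i []) j 0
          = PySem.List.pyGetD (PySem.List.pyGetD T i []) j 0
            + (if pvKey friends g == (i, j) then 1 else 0) := by
        rw [hT', pv_pyGetD_pySetD T _ _ _ _ ha0 hi0 (by omega)]
        by_cases hia : i = (pvKey friends g).1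
        · rw [if_pos hia]
          rw [pv_pyGetD_pySetD _ _ _ _ _ hb0 hj0 (by omega)]
          by_cases hjb : j = (pvKey friends g).2
          · rw [if_pos hjb, hia, hjb]
            have : (pvKey friends g == ((pvKey friends g).1, (pvKey friends g).2)) = true := by
              simp
            rw [this, if_pos rfl]
          · rw [if_neg hjb]
            have : (pvKey friends g == (i, j)) = false := by
              rw [beq_eq_false_iff_ne]
              intro h
              exact hjb (by rw [h])
            rw [this]
            simp [hia]
        · rw [if_neg hia]
          have : (pvKey friends g == (i, j)) = false := by
            rw [beq_eq_false_iff_ne]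
            intro h
            exact hia (by rw [h])
          rw [this]
          simp
      rw [List.foldl_cons]
      rw [ih (fun g' hg' => hb g' (List.mem_cons_of_mem _ hg')) T' hT'len hT'row i j hi0 hi hj0 hj]
      rw [hstep, List.countP_cons]
      push_cast
      by_cases hpg : pvKey friends g == (i, j)
      · simp [hpg]
        ring
      · simp [hpg]
  intro i j hi0 hi hj0 hj
  exact H gifts key (pvTable0 friends) (pv_table0_len friends) (pv_table0_row friends) i j hi0 hi hj0 hj
    |>.trans (by rw [pv_table0_entry friends i j hi0 hi hj0 hj]; unfold pvC; ring)

lemma pv_ind_sum_fst (n : Int) (p : Int × Int) (i : Int)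
    (hp : p.1 = i → 0 ≤ p.2 ∧ p.2 < n) :
    ((PySem.List.pyRange 0 n).map (fun j => if p == (i, j) then (1 : Int) else 0)).sum
      = if p.1 == i then (1 : Int) else 0 := by
  have hb : ∀ j : Int, (p == (i, j)) = (p.1 == i && p.2 == j) := by
    intro j; cases p; rfl
  simp only [hb]
  by_cases hpi : p.1 = i
  · have : ∀ j : Int, (p.1 == i && p.2 == j) = (j == p.2) := by
      intro j
      simp [hpi, eq_comm]
    simp only [this]
    rw [PySem.List.sum_map_ite_one_zero (fun j => j == p.2)]
    rw [← List.count_eq_countP, List.count_eq_one_of_mem (PySem.List.nodup_pyRange_one 0 n)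
      (PySem.List.mem_pyRange_one.mpr (hp hpi))]
    simp [hpi]
  · have : ∀ j : Int, (p.1 == i && p.2 == j) = false := by
      intro j
      simp [hpi]
    simp only [this]
    simp [hpi]

lemma pv_ind_sum_snd (n : Int) (p : Int × Int) (i : Int)
    (hp : p.2 = i → 0 ≤ p.1 ∧ p.1 < n) :
    ((PySem.List.pyRange 0 n).map (fun j => if p == (j, i) then (1 : Int) else 0)).sum
      = if p.2 == i then (1 : Int) else 0 := by
  have hb : ∀ j : Int, (p == (j, i)) = (p.1 == j && p.2 == i) := by
    intro j; cases p; rfl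
  simp only [hb]
  by_cases hpi : p.2 = i
  · have : ∀ j : Int, (p.1 == j && p.2 == i) = (j == p.1) := by
      intro j
      simp [hpi, eq_comm]
    simp only [this]
    rw [PySem.List.sum_map_ite_one_zero (fun j => j == p.1)]
    rw [← List.count_eq_countP, List.count_eq_one_of_mem (PySem.List.nodup_pyRange_one 0 n)
      (PySem.List.mem_pyRange_one.mpr (hp hpi))]
    simp [hpi]
  · have : ∀ j : Int, (p.1 == j && p.2 == i) = false := by
      intro j
      simp [hpi]
    simp only [this]
    simp [hpi]

lemma pv_sum_count_fst (n : Int) (ks : List (Int × Int))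
    (hk : ∀ p ∈ ks, 0 ≤ p.2 ∧ p.2 < n) (i : Int) :
    ((PySem.List.pyRange 0 n).map (fun j => (ks.countP (fun p => p == (i, j)) : Int))).sum
      = (ks.countP (fun p => p.1 == i) : Int) := by
  induction ks with
  | nil => simp
  | cons p ks ih =>
    have hmap : ∀ j : Int, (((p :: ks).countP (fun q => q == (i, j)) : Nat) : Int)
        = (ks.countP (fun q => q == (i, j)) : Int) + (if p == (i, j) then (1 : Int) else 0) := by
      intro j
      rw [List.countP_cons]
      by_cases h : p == (i, j) <;> simp [h]
    rw [List.map_congr_left (fun j _ => hmap j), PySem.List.sum_map_add_int]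
    rw [ih (fun q hq => hk q (List.mem_cons_of_mem _ hq))]
    rw [pv_ind_sum_fst n p i (fun _ => (hk p List.mem_cons_self))]
    rw [List.countP_cons]
    by_cases h : (p.1 == i) <;> simp [h]
lemma pv_sum_count_snd (n : Int) (ks : List (Int × Int))
    (hk : ∀ p ∈ ks, 0 ≤ p.1 ∧ p.1 < n) (i : Int) :
    ((PySem.List.pyRange 0 n).map (fun j => (ks.countP (fun p => p == (j, i)) : Int))).sum
      = (ks.countP (fun p => p.2 == i) : Int) := by
  induction ks with
  | nil => simp
  | cons p ks ih =>
    have hmap : ∀ j : Int, (((p :: ks).countP (fun q => q == (j, i)) : Nat) : Int)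
        = (ks.countP (fun q => q == (j, i)) : Int) + (if p == (j, i) then (1 : Int) else 0) := by
      intro j
      rw [List.countP_cons]
      by_cases h : p == (j, i) <;> simp [h]
    rw [List.map_congr_left (fun j _ => hmap j), PySem.List.sum_map_add_int]
    rw [ih (fun q hq => hk q (List.mem_cons_of_mem _ hq))]
    rw [pv_ind_sum_snd n p i (fun _ => (hk p List.mem_cons_self))]
    rw [List.countP_cons]
    by_cases h : (p.2 == i) <;> simp [h]

lemma pv_ks_bound (friends gifts : List String) (hpre : Pre_solution friends gifts) :
    ∀ p ∈ gifts.map (pvKey friends), (0 ≤ p.1 ∧ p.1 < pvN friends) ∧ (0 ≤ p.2 ∧ p.2 < pvN friends) := by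
  intro p hp
  rw [List.mem_map] at hp
  obtain ⟨g, hg, rfl⟩ := hp
  exact pv_key_bound friends gifts hpre g hg

lemma pv_pvC_eq_countP (friends gifts : List String) (i j : Int) :
    pvC friends gifts i j = ((gifts.map (pvKey friends)).countP (fun p => p == (i, j)) : Int) := by
  unfold pvC
  rw [List.countP_map]
  rfl

lemma pv_scoreA_char (friends gifts : List String) (hpre : Pre_solution friends gifts) :
    ∀ i : Int, 0 ≤ i → i < pvN friends →
      PySem.List.pyGetD (pvScoreA friends gifts) i 0 = pvScore friends gifts i := by
  intro i hi0 hin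
  unfold pvScoreA
  rw [PySem.List.foldl_append_singleton_eq_map]
  rw [List.nil_append]
  rw [PySem.List.pyGetD_map_pyRange_of_nonneg _ _ _ _ hi0 hin]
  rw [PySem.List.foldl_add, PySem.List.foldl_add]
  have hrow : ∀ j : Int, j ∈ PySem.List.pyRange 0 (pvN friends) →
      PySem.List.pyGetD (PySem.List.pyGetD (pvTable friends gifts) i []) j 0 = pvC friends gifts i j := by
    intro j hj
    rw [PySem.List.mem_pyRange_one] at hj
    exact pv_table_char friends gifts hpre i j hi0 hin hj.1 hj.2
  have hcol : ∀ j : Int, j ∈ PySem.List.pyRange 0 (pvN friends) →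
      PySem.List.pyGetD (PySem.List.pyGetD (pvTable friends gifts) j []) i 0 = pvC friends gifts j i := by
    intro j hj
    rw [PySem.List.mem_pyRange_one] at hj
    exact pv_table_char friends gifts hpre j i hj.1 hj.2 hi0 hin
  rw [List.map_congr_left hrow, List.map_congr_left hcol]
  have h1 : ((PySem.List.pyRange 0 (pvN friends)).map (fun j => pvC friends gifts i j)).sum
      = pvGiven friends gifts i := by
    have := pv_sum_count_fst (pvN friends) (gifts.map (pvKey friends))
      (fun p hp => (pv_ks_bound friends gifts hpre p hp).2) i
    rw [List.map_congr_left (fun j _ => pv_pvC_eq_countP friends gifts i j), this]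
    unfold pvGiven
    rw [List.countP_map]
    rfl
  have h2 : ((PySem.List.pyRange 0 (pvN friends)).map (fun j => pvC friends gifts j i)).sum
      = pvRecv friends gifts i := by
    have := pv_sum_count_snd (pvN friends) (gifts.map (pvKey friends))
      (fun p hp => (pv_ks_bound friends gifts hpre p hp).1) i
    rw [List.map_congr_left (fun j _ => pv_pvC_eq_countP friends gifts j i), this]
    unfold pvRecv
    rw [List.countP_map]
    rfl
  rw [h1, h2]
  unfold pvScore
  ring

lemma pv_expectA_char (friends gifts : List String) (hpre : Pre_solution friends gifts)
    (k : Int) (hk0 : 0 ≤ k) (hkn : k < pvN friends) :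
    PySem.List.pyGetD (pvExpectA friends gifts) k 0 =
      ((PySem.List.pyRange 0 (pvN friends)).map (fun i =>
        ((PySem.List.pyRange 0 (pvN friends)).map (fun j => pvDA friends gifts i j k)).sum)).sum := by
  have hlen_inner : ∀ (i : Int) (e : List Int) (j : Int),
      ((fun e j => if i ≠ j then
          if PySem.List.pyGetD (PySem.List.pyGetD (pvTable friends gifts) i []) j 0
              < PySem.List.pyGetD (PySem.List.pyGetD (pvTable friends gifts) j []) i 0 then
            PySem.List.pySetD e j (PySem.List.pyGetD e j 0 + 1)
          else if PySem.List.pyGetD (PySem.List.pyGetD (pvTable friends gifts) i []) j 0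
                = PySem.List.pyGetD (PySem.List.pyGetD (pvTable friends gifts) j []) i 0 ∧
              PySem.List.pyGetD (pvScoreA friends gifts) i 0 < PySem.List.pyGetD (pvScoreA friends gifts) j 0 then
            PySem.List.pySetD e j (PySem.List.pyGetD e j 0 + 1)
          else e
        else e : List Int → Int → List Int) e j).length = e.length := by
    intro i e j
    dsimp only
    split_ifs <;> simp [PySem.List.length_pySetD]
  have hrep : (PySem.List.pyRepeat [(0 : Int)] (pvN friends)).length = friends.length := by
    rw [PySem.List.pyRepeat_singleton]; simp [pvN]
  unfold pvExpectA
  rw [pv_foldl_delta friends.length _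
    (fun i k => ((PySem.List.pyRange 0 (pvN friends)).map (fun j => pvDA friends gifts i j k)).sum)
    (fun e i => pv_foldl_len _ (hlen_inner i) _ e)
    (PySem.List.pyRange 0 (pvN friends))
    (by
      intro e i k' he hi hk0' hkn'
      have hib := PySem.List.mem_pyRange_one.mp hi
      rw [pv_foldl_delta friends.length _ (fun j k => pvDA friends gifts i j k)
        (hlen_inner i) (PySem.List.pyRange 0 (pvN friends))
        (by
          intro e' j k'' he' hj hk0'' hkn''
          have hjb := PySem.List.mem_pyRange_one.mp hj
          have h1 := pv_table_char friends gifts hpre i j hib.1 hib.2 hjb.1 hjb.2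
          have h2 := pv_table_char friends gifts hpre j i hjb.1 hjb.2 hib.1 hib.2
          have h3 := pv_scoreA_char friends gifts hpre i hib.1 hib.2
          have h4 := pv_scoreA_char friends gifts hpre j hjb.1 hjb.2
          dsimp only
          simp only [h1, h2, h3, h4]
          by_cases hij : i = j
          · rw [if_neg (by omega)]
            have hz : pvDA friends gifts i j k'' = 0 := by
              unfold pvDA
              rw [if_neg (fun hcon => hcon.1 hij)]
            rw [hz]
            ring
          · rw [if_pos hij]
            by_cases hc1 : pvC friends gifts i j < pvC friends gifts j i
            · rw [if_pos hc1]
              rw [pv_pyGetD_pySetD e' _ _ _ _ hjb.1 hk0'' (by rw [he']; exact hkn'')]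
              by_cases hjk : k'' = j
              · have hone : pvDA friends gifts i j k'' = 1 := by
                  unfold pvDA
                  rw [if_pos ⟨hij, Or.inl hc1, hjk.symm⟩]
                rw [if_pos hjk, hone, hjk]
              · have hz : pvDA friends gifts i j k'' = 0 := by
                  unfold pvDA
                  rw [if_neg (fun hcon => hjk hcon.2.2.symm)]
                rw [if_neg hjk, hz]
                ring
            · rw [if_neg hc1]
              by_cases hc2 : pvC friends gifts i j = pvC friends gifts j i ∧
                  pvScore friends gifts i < pvScore friends gifts j
              · rw [if_pos hc2]
                rw [pv_pyGetD_pySetD e' _ _ _ _ hjb.1 hk0'' (by rw [he']; exact hkn'')]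
                by_cases hjk : k'' = j
                · have hone : pvDA friends gifts i j k'' = 1 := by
                    unfold pvDA
                    rw [if_pos ⟨hij, Or.inr hc2, hjk.symm⟩]
                  rw [if_pos hjk, hone, hjk]
                · have hz : pvDA friends gifts i j k'' = 0 := by
                    unfold pvDA
                    rw [if_neg (fun hcon => hjk hcon.2.2.symm)]
                  rw [if_neg hjk, hz]
                  ring
              · rw [if_neg hc2]
                have hz : pvDA friends gifts i j k'' = 0 := by
                  unfold pvDA
                  refine if_neg ?_
                  rintro ⟨-, hwin, -⟩
                  rcases hwin with h | h
                  · exact hc1 h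
                  · exact hc2 h
                rw [hz]
                ring)
        e k' he hk0' hkn'])
    (PySem.List.pyRepeat [(0 : Int)] (pvN friends)) k hrep hk0 (by exact hkn)]
  have hinit : PySem.List.pyGetD (PySem.List.pyRepeat [(0 : Int)] (pvN friends)) k 0 = 0 := by
    rw [PySem.List.pyRepeat_singleton,
      PySem.List.pyGetD_eq_getElem _ _ hk0 (by simpa [pvN] using hkn)]
    simp
  rw [hinit]
  ring

lemma pv_pair_sum (n : Nat) (h : Int → Int → Int) (hd : ∀ i, h i i = 0) :
    ((PySem.List.pyRange 0 (n : Int)).map (fun i =>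
        ((PySem.List.pyRange 0 (n : Int)).map (fun j => h i j)).sum)).sum
      = ((PySem.List.pyRange 0 (n : Int)).map (fun i =>
        ((PySem.List.pyRange (i + 1) (n : Int)).map (fun j => h i j + h j i)).sum)).sum := by
  induction n with
  | zero => simp [PySem.List.pyRange_one_eq_nil]
  | succ m ih =>
    have h0m : (0 : Int) ≤ (m : Int) := by positivity
    push_cast
    rw [PySem.List.pyRange_one_succ_right h0m]
    have hR : (PySem.List.pyRange 0 (m : Int)).map (fun i =>
          ((PySem.List.pyRange (i + 1) ((m : Int) + 1)).map (fun j => h i j + h j i)).sum)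
        = (PySem.List.pyRange 0 (m : Int)).map (fun i =>
          ((PySem.List.pyRange (i + 1) (m : Int)).map (fun j => h i j + h j i)).sum
            + (h i (m : Int) + h (m : Int) i)) := by
      refine List.map_congr_left ?_
      intro i hi
      have hib := PySem.List.mem_pyRange_one.mp hi
      rw [PySem.List.pyRange_one_succ_right (by omega)]
      simp
    simp only [List.map_append, List.map_cons, List.map_nil, List.sum_append, List.sum_cons,
      List.sum_nil, add_zero, PySem.List.pyRange_one_eq_nil (le_refl ((m : Int) + 1))]
    rw [hR]
    rw [PySem.List.sum_map_add_int, PySem.List.sum_map_add_int, PySem.List.sum_map_add_int, ih, hd]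
    ring

lemma pv_expectA_len (friends gifts : List String) :
    (pvExpectA friends gifts).length = friends.length := by
  unfold pvExpectA
  rw [pv_foldl_len _ (fun e i => pv_foldl_len _
    (fun e' j => by split_ifs <;> simp [PySem.List.length_pySetD]) _ e)]
  rw [PySem.List.pyRepeat_singleton]
  simp [pvN]

-- ---- B side: the one-pass fold splits into four independent folds ----
lemma pv_quad_split (f1 : PySem.Dict (Int × Int) Int → String → PySem.Dict (Int × Int) Int)
    (f2 f3 : List Int → String → List Int)
    (f4 : PySem.Set (Int × Int) → String → PySem.Set (Int × Int)) :
    ∀ (L : List String) (d : PySem.Dict (Int × Int) Int) (u v : List Int)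
      (s : PySem.Set (Int × Int)),
      L.foldl (fun st g => (f1 st.1 g, f2 st.2.1 g, f3 st.2.2.1 g, f4 st.2.2.2 g)) (d, u, v, s)
        = (L.foldl f1 d, L.foldl f2 u, L.foldl f3 v, L.foldl f4 s) := by
  intro L
  induction L with
  | nil => intro d u v s; rfl
  | cons x L ih => intro d u v s; simp only [List.foldl_cons]; exact ih _ _ _ _

lemma pv_stB_eq (friends gifts : List String) :
    pvStB friends gifts =
      (gifts.foldl (fun d g => d.modify (pvKey friends g) 0 (· + 1)) PySem.Dict.empty,
       gifts.foldl (fun e g => PySem.List.pySetD e (pvKey friends g).1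
          (PySem.List.pyGetD e (pvKey friends g).1 0 + 1)) (PySem.List.pyRepeat [(0 : Int)] (pvN friends)),
       gifts.foldl (fun e g => PySem.List.pySetD e (pvKey friends g).2
          (PySem.List.pyGetD e (pvKey friends g).2 0 + 1)) (PySem.List.pyRepeat [(0 : Int)] (pvN friends)),
       gifts.foldl (fun s g =>
          if (pvKey friends g).1 ≠ (pvKey friends g).2 then
            PySem.Set.add s (if (pvKey friends g).1 < (pvKey friends g).2 then
              ((pvKey friends g).1, (pvKey friends g).2)
              else ((pvKey friends g).2, (pvKey friends g).1))
          else s) PySem.Set.empty) := by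
  unfold pvStB
  rw [pv_idx_eq]
  exact pv_quad_split
    (fun d g => d.modify (pvKey friends g) 0 (· + 1))
    (fun e g => PySem.List.pySetD e (pvKey friends g).1 (PySem.List.pyGetD e (pvKey friends g).1 0 + 1))
    (fun e g => PySem.List.pySetD e (pvKey friends g).2 (PySem.List.pyGetD e (pvKey friends g).2 0 + 1))
    (fun s g =>
      if (pvKey friends g).1 ≠ (pvKey friends g).2 then
        PySem.Set.add s (if (pvKey friends g).1 < (pvKey friends g).2 then
          ((pvKey friends g).1, (pvKey friends g).2)
          else ((pvKey friends g).2, (pvKey friends g).1))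
      else s)
    gifts _ _ _ _

lemma pv_cnt_char (friends gifts : List String) (i j : Int) :
    (pvStB friends gifts).1.getD (i, j) 0 = pvC friends gifts i j := by
  rw [pv_stB_eq]
  show (gifts.foldl (fun d g => d.modify (pvKey friends g) 0 (· + 1)) PySem.Dict.empty).getD (i, j) 0
    = pvC friends gifts i j
  have hfm := List.foldl_map (f := pvKey friends)
    (g := fun (d : PySem.Dict (Int × Int) Int) (x : Int × Int) => d.modify x 0 (· + 1))
    (l := gifts) (init := PySem.Dict.empty)
  rw [show (fun (d : PySem.Dict (Int × Int) Int) (g : String) => d.modify (pvKey friends g) 0 (· + 1))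
      = (fun d g => (fun (d : PySem.Dict (Int × Int) Int) (x : Int × Int) => d.modify x 0 (· + 1)) d (pvKey friends g)) from rfl]
  rw [← hfm]
  rw [PySem.Dict.getD_foldl_modify_add_one]
  rw [PySem.Dict.getD_empty]
  rw [List.count_eq_countP]
  rw [pv_pvC_eq_countP]
  simp

lemma pv_given_char (friends gifts : List String) (hpre : Pre_solution friends gifts) (k : Int)
    (hk0 : 0 ≤ k) (hkn : k < pvN friends) :
    PySem.List.pyGetD (pvStB friends gifts).2.1 k 0 = pvGiven friends gifts k := by
  rw [pv_stB_eq]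
  have hrep : (PySem.List.pyRepeat [(0 : Int)] (pvN friends)).length = friends.length := by
    rw [PySem.List.pyRepeat_singleton]; simp [pvN]
  have := pv_foldl_delta friends.length
    (fun e g => PySem.List.pySetD e (pvKey friends g).1 (PySem.List.pyGetD e (pvKey friends g).1 0 + 1))
    (fun g k => if (pvKey friends g).1 == k then 1 else 0)
    (fun e g => PySem.List.length_pySetD _ _ _)
    gifts
    (by
      intro e g k he hg hk0 hkn
      obtain ⟨⟨ha0, han⟩, -⟩ := pv_key_bound friends gifts hpre g hg
      have heI : ((e.length : Nat) : Int) = pvN friends := by rw [he]; rfl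
      rw [pv_pyGetD_pySetD e _ _ _ _ ha0 hk0 (by omega)]
      by_cases hka : k = (pvKey friends g).1
      · rw [if_pos hka, hka]
        simp
      · rw [if_neg hka]
        have hfalse : ((pvKey friends g).1 == k) = false := by
          rw [beq_eq_false_iff_ne]
          intro h
          exact hka h.symm
        simp [hfalse])
    (PySem.List.pyRepeat [(0 : Int)] (pvN friends)) k hrep hk0 (by exact hkn)
  rw [this]
  have hinit : PySem.List.pyGetD (PySem.List.pyRepeat [(0 : Int)] (pvN friends)) k 0 = 0 := by
    rw [PySem.List.pyRepeat_singleton,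
      PySem.List.pyGetD_eq_getElem _ _ hk0 (by simpa [pvN] using hkn)]
    simp
  rw [hinit, PySem.List.sum_map_ite_one_zero ((fun g => (pvKey friends g).1 == k))]
  unfold pvGiven
  simp

lemma pv_recv_char (friends gifts : List String) (hpre : Pre_solution friends gifts) (k : Int)
    (hk0 : 0 ≤ k) (hkn : k < pvN friends) :
    PySem.List.pyGetD (pvStB friends gifts).2.2.1 k 0 = pvRecv friends gifts k := by
  rw [pv_stB_eq]
  have hrep : (PySem.List.pyRepeat [(0 : Int)] (pvN friends)).length = friends.length := by
    rw [PySem.List.pyRepeat_singleton]; simp [pvN]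
  have := pv_foldl_delta friends.length
    (fun e g => PySem.List.pySetD e (pvKey friends g).2 (PySem.List.pyGetD e (pvKey friends g).2 0 + 1))
    (fun g k => if (pvKey friends g).2 == k then 1 else 0)
    (fun e g => PySem.List.length_pySetD _ _ _)
    gifts
    (by
      intro e g k he hg hk0 hkn
      obtain ⟨-, ⟨hb0, hbn⟩⟩ := pv_key_bound friends gifts hpre g hg
      have heI : ((e.length : Nat) : Int) = pvN friends := by rw [he]; rfl
      rw [pv_pyGetD_pySetD e _ _ _ _ hb0 hk0 (by omega)]
      by_cases hka : k = (pvKey friends g).2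
      · rw [if_pos hka, hka]
        simp
      · rw [if_neg hka]
        have hfalse : ((pvKey friends g).2 == k) = false := by
          rw [beq_eq_false_iff_ne]
          intro h
          exact hka h.symm
        simp [hfalse])
    (PySem.List.pyRepeat [(0 : Int)] (pvN friends)) k hrep hk0 (by exact hkn)
  rw [this]
  have hinit : PySem.List.pyGetD (PySem.List.pyRepeat [(0 : Int)] (pvN friends)) k 0 = 0 := by
    rw [PySem.List.pyRepeat_singleton,
      PySem.List.pyGetD_eq_getElem _ _ hk0 (by simpa [pvN] using hkn)]
    simp
  rw [hinit, PySem.List.sum_map_ite_one_zero ((fun g => (pvKey friends g).2 == k))]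
  unfold pvRecv
  simp

lemma pv_scoreB_char (friends gifts : List String) (hpre : Pre_solution friends gifts) :
    ∀ i : Int, 0 ≤ i → i < pvN friends → pvF friends gifts i = pvScore friends gifts i := by
  intro i hi0 hin
  unfold pvF pvScoreB
  rw [PySem.List.pyGetD_map_pyRange_of_nonneg _ _ _ _ hi0 hin]
  rw [pv_given_char friends gifts hpre i hi0 hin, pv_recv_char friends gifts hpre i hi0 hin]
  rfl

-- ---- the set of exchanged pairs ----
lemma pv_P_eq (friends gifts : List String) :
    pvP friends gifts = PySem.Set.ofList
      ((gifts.filter (fun g => decide ((pvKey friends g).1 ≠ (pvKey friends g).2))).map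
        (fun g => pvNorm (pvKey friends g))) := by
  unfold pvP
  rw [pv_stB_eq]
  show gifts.foldl (fun s g =>
      if (pvKey friends g).1 ≠ (pvKey friends g).2 then
        PySem.Set.add s (if (pvKey friends g).1 < (pvKey friends g).2 then
          ((pvKey friends g).1, (pvKey friends g).2)
          else ((pvKey friends g).2, (pvKey friends g).1))
      else s) PySem.Set.empty = _
  have hnorm : ∀ g, (if (pvKey friends g).1 < (pvKey friends g).2 then
      ((pvKey friends g).1, (pvKey friends g).2)
      else ((pvKey friends g).2, (pvKey friends g).1)) = pvNorm (pvKey friends g) := by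
    intro g
    unfold pvNorm
    by_cases h : (pvKey friends g).1 < (pvKey friends g).2 <;> simp [h]
  simp only [hnorm]
  rw [PySem.List.foldl_ite_eq_foldl_filter
    (p := fun g => (pvKey friends g).1 ≠ (pvKey friends g).2)
    (f := fun s g => PySem.Set.add s (pvNorm (pvKey friends g)))]
  rw [← PySem.Set.update_map_eq_foldl_add, PySem.Set.update_empty]

lemma pv_mem_P (friends gifts : List String) (p : Int × Int) :
    p ∈ pvP friends gifts ↔ ∃ g ∈ gifts,
      (pvKey friends g).1 ≠ (pvKey friends g).2 ∧ p = pvNorm (pvKey friends g) := by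
  rw [pv_P_eq, PySem.Set.mem_ofList]
  simp only [List.mem_map, List.mem_filter, decide_eq_true_eq]
  constructor
  · rintro ⟨g, ⟨hg, hne⟩, rfl⟩
    exact ⟨g, hg, hne, rfl⟩
  · rintro ⟨g, hg, hne, rfl⟩
    exact ⟨g, ⟨hg, hne⟩, rfl⟩

lemma pv_P_nodup (friends gifts : List String) : (pvP friends gifts).Nodup := by
  rw [pv_P_eq]
  exact PySem.Set.nodup_ofList _

lemma pv_P_bound (friends gifts : List String) (hpre : Pre_solution friends gifts) :
    ∀ p ∈ pvP friends gifts, 0 ≤ p.1 ∧ p.1 < p.2 ∧ p.2 < pvN friends := by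
  intro p hp
  obtain ⟨g, hg, hne, rfl⟩ := (pv_mem_P friends gifts p).mp hp
  obtain ⟨⟨ha0, han⟩, ⟨hb0, hbn⟩⟩ := pv_key_bound friends gifts hpre g hg
  unfold pvNorm
  by_cases h : (pvKey friends g).1 < (pvKey friends g).2
  · rw [if_pos h]
    exact ⟨ha0, h, hbn⟩
  · rw [if_neg h]
    exact ⟨hb0, by omega, han⟩

lemma pv_P_of_C (friends gifts : List String) (i j : Int) (hij : i ≠ j)
    (h : pvC friends gifts i j ≠ 0) : pvNorm (i, j) ∈ pvP friends gifts := by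
  unfold pvC at h
  have hpos : 0 < gifts.countP (fun g => pvKey friends g == (i, j)) := by
    omega
  rw [List.countP_pos_iff] at hpos
  obtain ⟨g, hg, hk⟩ := hpos
  have hk' : pvKey friends g = (i, j) := by
    exact eq_of_beq hk
  rw [pv_mem_P]
  exact ⟨g, hg, by rw [hk']; exact hij, by rw [hk']⟩

lemma pv_notin_P_zero (friends gifts : List String) (i j : Int) (hij : i < j)
    (hnp : (i, j) ∉ pvP friends gifts) :
    pvC friends gifts i j = 0 ∧ pvC friends gifts j i = 0 := by
  constructor
  · by_contra h
    apply hnp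
    have := pv_P_of_C friends gifts i j (by omega) h
    unfold pvNorm at this
    rw [if_pos (by exact hij)] at this
    exact this
  · by_contra h
    apply hnp
    have := pv_P_of_C friends gifts j i (by omega) h
    unfold pvNorm at this
    rw [if_neg (by omega)] at this
    exact this

-- ---- the rank (bulk) fold: wins[i] = number of strictly smaller keys ----
lemma pv_rank_go (f : Int → Int) (nN : Nat) :
    ∀ (R T wins : List Int) (j : Int) (prev : Option Int),
      (T ++ R).Pairwise (fun a b => f a ≤ f b) →
      (∀ x ∈ T ++ R, 0 ≤ x ∧ x < (nN : Int)) →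
      wins.length = nN →
      (match prev with
       | none => T = [] ∧ j = 0
       | some p => (∃ t ∈ T, f t = p) ∧ (∀ t ∈ T, f t ≤ p) ∧
           j = ((T ++ R).countP (fun x => decide (f x < p)) : Int)) →
      ((R.foldl (pvRankStep f) (wins, j, prev, (T.length : Int))).1.length = nN) ∧
      (∀ k : Int, 0 ≤ k → k < (nN : Int) →
        PySem.List.pyGetD (R.foldl (pvRankStep f) (wins, j, prev, (T.length : Int))).1 k 0
          = if k ∈ R then ((T ++ R).countP (fun x => decide (f x < f k)) : Int)
            else PySem.List.pyGetD wins k 0) := by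
  intro R
  induction R with
  | nil =>
    intro T wins j prev _ _ hw _
    refine ⟨hw, ?_⟩
    intro k _ _
    simp
  | cons x R' ih =>
    intro T wins j prev hpw hb hw hprev
    have hxb := hb x (by simp)
    have hj' : (if prev ≠ none ∧ some (f x) ≠ prev then (T.length : Int) else j)
        = ((T ++ x :: R').countP (fun y => decide (f y < f x)) : Int) := by
      match prev, hprev with
      | none, ⟨hT, hj0⟩ =>
        simp only [ne_eq, not_true_eq_false, false_and, if_false]
        subst hT
        rw [hj0]
        rw [List.nil_append] at hpw ⊢
        have := (List.pairwise_cons.mp hpw).1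
        have hz : (x :: R').countP (fun y => decide (f y < f x)) = 0 := by
          rw [List.countP_eq_zero]
          intro y hy
          rcases List.mem_cons.mp hy with rfl | hy'
          · simp
          · have := this y hy'
            simp
            omega
        rw [hz]
        simp
      | some p, ⟨⟨t0, ht0, ht0p⟩, hle, hjc⟩ =>
        by_cases hfx : f x = p
        · have : ¬ (some p ≠ none ∧ some (f x) ≠ some p) := by
            simp [hfx]
          rw [if_neg this, hjc]
          congr 2
          funext y
          rw [hfx]
        · rw [if_pos (by simp [hfx])]
          obtain ⟨hpwT, hpwR, hcross⟩ := List.pairwise_append.mp hpw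
          have hpx : p < f x := by
            have := hcross t0 ht0 x (by simp)
            rw [ht0p] at this
            omega
          have hTfull : T.countP (fun y => decide (f y < f x)) = T.length := by
            rw [List.countP_eq_length]
            intro y hy
            have := hle y hy
            simp
            omega
          have hRzero : (x :: R').countP (fun y => decide (f y < f x)) = 0 := by
            rw [List.countP_eq_zero]
            intro y hy
            rcases List.mem_cons.mp hy with rfl | hy'
            · simp
            · have := (List.pairwise_cons.mp hpwR).1 y hy'
              simp
              omega
          rw [List.countP_append, hTfull, hRzero]
          simp
    have hassoc : T ++ x :: R' = (T ++ [x]) ++ R' := by simp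
    have step_eq : pvRankStep f (wins, j, prev, (T.length : Int)) x
        = (PySem.List.pySetD wins x (if prev ≠ none ∧ some (f x) ≠ prev then (T.length : Int) else j),
           (if prev ≠ none ∧ some (f x) ≠ prev then (T.length : Int) else j),
           some (f x), (T.length : Int) + 1) := rfl
    have hlen2 : ((T ++ [x]).length : Int) = (T.length : Int) + 1 := by simp
    have IH := ih (T ++ [x])
      (PySem.List.pySetD wins x (if prev ≠ none ∧ some (f x) ≠ prev then (T.length : Int) else j))
      (if prev ≠ none ∧ some (f x) ≠ prev then (T.length : Int) else j)
      (some (f x))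
      (by rw [← hassoc]; exact hpw)
      (by rw [← hassoc]; exact hb)
      (by rw [PySem.List.length_pySetD]; exact hw)
      (by
        refine ⟨⟨x, by simp, rfl⟩, ?_, ?_⟩
        · intro t ht
          rcases List.mem_append.mp ht with ht' | ht'
          · obtain ⟨-, -, hcross⟩ := List.pairwise_append.mp hpw
            exact hcross t ht' x (by simp)
          · rw [List.mem_singleton.mp ht']
        · rw [hj', hassoc])
    rw [List.foldl_cons, step_eq] at *
    rw [show ((T ++ [x]).length : Int) = (T.length : Int) + 1 from hlen2] at IH
    refine ⟨IH.1, ?_⟩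
    intro k hk0 hkn
    rw [IH.2 k hk0 hkn]
    by_cases hkR : k ∈ R'
    · rw [if_pos hkR, if_pos (by simp [hkR]), hassoc]
    · rw [if_neg hkR]
      rw [pv_pyGetD_pySetD wins _ _ _ _ hxb.1 hk0 (by rw [hw]; exact hkn)]
      by_cases hkx : k = x
      · rw [if_pos hkx, hj',
          if_pos (show k ∈ x :: R' from by rw [hkx]; exact List.mem_cons_self), hkx]
      · rw [if_neg hkx, if_neg (by simp [hkx, hkR])]

lemma pv_mem_order (friends gifts : List String) (x : Int) :
    x ∈ pvOrder friends gifts ↔ 0 ≤ x ∧ x < pvN friends := by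
  unfold pvOrder
  rw [PySem.List.mem_sorted, PySem.List.mem_pyRange_one]

lemma pv_rk_len (friends gifts : List String) :
    (pvRk friends gifts).1.length = friends.length := by
  have hrep : (PySem.List.pyRepeat [(0 : Int)] (pvN friends)).length = friends.length := by
    rw [PySem.List.pyRepeat_singleton]; simp [pvN]
  have hb : ∀ x ∈ ([] : List Int) ++ pvOrder friends gifts, 0 ≤ x ∧ x < ((friends.length : Nat) : Int) := by
    intro x hx
    rw [List.nil_append] at hx
    have := (pv_mem_order friends gifts x).mp hx
    exact ⟨this.1, by exact_mod_cast this.2⟩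
  have := pv_rank_go (pvF friends gifts) friends.length (pvOrder friends gifts) []
    (PySem.List.pyRepeat [(0 : Int)] (pvN friends)) 0 none
    (by rw [List.nil_append]; exact PySem.List.sorted_pairwise _ _)
    hb hrep ⟨rfl, rfl⟩
  exact this.1

lemma pv_rk_char (friends gifts : List String) (hpre : Pre_solution friends gifts)
    (k : Int) (hk0 : 0 ≤ k) (hkn : k < pvN friends) :
    PySem.List.pyGetD (pvRk friends gifts).1 k 0
      = ((PySem.List.pyRange 0 (pvN friends) 1).countP
          (fun x => decide (pvScore friends gifts x < pvScore friends gifts k)) : Int) := by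
  have hrep : (PySem.List.pyRepeat [(0 : Int)] (pvN friends)).length = friends.length := by
    rw [PySem.List.pyRepeat_singleton]; simp [pvN]
  have hb : ∀ x ∈ ([] : List Int) ++ pvOrder friends gifts, 0 ≤ x ∧ x < ((friends.length : Nat) : Int) := by
    intro x hx
    rw [List.nil_append] at hx
    have := (pv_mem_order friends gifts x).mp hx
    exact ⟨this.1, by exact_mod_cast this.2⟩
  have H := pv_rank_go (pvF friends gifts) friends.length (pvOrder friends gifts) []
    (PySem.List.pyRepeat [(0 : Int)] (pvN friends)) 0 none
    (by rw [List.nil_append]; exact PySem.List.sorted_pairwise _ _)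
    hb hrep ⟨rfl, rfl⟩
  have hkn' : k < ((friends.length : Nat) : Int) := by exact_mod_cast hkn
  have hmem : k ∈ pvOrder friends gifts := (pv_mem_order friends gifts k).mpr ⟨hk0, hkn⟩
  have := H.2 k hk0 hkn'
  rw [if_pos hmem, List.nil_append] at this
  unfold pvRk
  rw [show ((([] : List Int).length : Nat) : Int) = (0 : Int) from rfl] at this
  rw [this]
  have hperm : (pvOrder friends gifts).Perm (PySem.List.pyRange 0 (pvN friends) 1) :=
    PySem.List.sorted_perm _ _ _
  rw [hperm.countP_eq]
  congr 1
  apply List.countP_congr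
  intro x hx
  rw [PySem.List.mem_pyRange_one] at hx
  rw [pv_scoreB_char friends gifts hpre x hx.1 hx.2,
    pv_scoreB_char friends gifts hpre k hk0 hkn]

-- ---- small summation helpers ----
lemma pv_sum_map_ite (l : List Int) (P : Int → Prop) [DecidablePred P] :
    (l.map (fun i => if P i then (1 : Int) else 0)).sum = (l.countP (fun i => decide (P i)) : Int) := by
  induction l with
  | nil => simp
  | cons x l ih =>
    rw [List.map_cons, List.sum_cons, ih, List.countP_cons]
    by_cases h : P x
    · simp [h]
      omega
    · simp [h]

lemma pv_sum_single (l : List Int) (k : Int) (c : Int) (hnd : l.Nodup) (hk : k ∈ l) :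
    (l.map (fun j => if j = k then c else 0)).sum = c := by
  induction l with
  | nil => cases hk
  | cons x l ih =>
    obtain ⟨hx, hl⟩ := List.nodup_cons.mp hnd
    rcases List.mem_cons.mp hk with rfl | hk'
    · rw [List.map_cons, List.sum_cons, if_pos rfl]
      have hz : (l.map (fun j => if j = k then c else 0)).sum = 0 := by
        apply List.sum_eq_zero
        intro y hy
        rw [List.mem_map] at hy
        obtain ⟨j, hj, rfl⟩ := hy
        rw [if_neg (by rintro rfl; exact hx hj)]
      rw [hz]
      ring
    · rw [List.map_cons, List.sum_cons, if_neg (by rintro rfl; exact hx hk'), ih hl hk']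
      ring

lemma pv_sum_ite_eq (n k : Int) (P : Int → Prop) [DecidablePred P]
    (hk0 : 0 ≤ k) (hkn : k < n) :
    ((PySem.List.pyRange 0 n 1).map (fun j => if P j ∧ j = k then (1 : Int) else 0)).sum
      = if P k then (1 : Int) else 0 := by
  have hc : ∀ j ∈ PySem.List.pyRange 0 n 1,
      (if P j ∧ j = k then (1 : Int) else 0) = if j = k then (if P k then (1 : Int) else 0) else 0 := by
    intro j _
    by_cases hjk : j = k
    · subst hjk
      by_cases hp : P j <;> simp [hp]
    · simp [hjk]
  rw [List.map_congr_left hc]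
  exact pv_sum_single _ k _ (PySem.List.nodup_pyRange_one 0 n)
    (PySem.List.mem_pyRange_one.mpr ⟨hk0, hkn⟩)

lemma pv_sum_flatMap (l : List Int) (h : Int → List Int) :
    (l.flatMap h).sum = (l.map (fun i => (h i).sum)).sum := by
  induction l with
  | nil => rfl
  | cons x l ih => simp [List.flatMap_cons, ih]

-- the bulk count as an unordered pair sum
lemma pv_bulk_sum (friends gifts : List String) (k : Int) (hk0 : 0 ≤ k) (hkn : k < pvN friends) :
    ((PySem.List.pyRange 0 (pvN friends) 1).countP
        (fun x => decide (pvScore friends gifts x < pvScore friends gifts k)) : Int)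
      = ((PySem.List.pyRange 0 (pvN friends)).map (fun i =>
          ((PySem.List.pyRange (i + 1) (pvN friends)).map
            (fun j => pvSd friends gifts i j k + pvSd friends gifts j i k)).sum)).sum := by
  have hN : pvN friends = ((friends.length : Nat) : Int) := rfl
  have hpair := pv_pair_sum friends.length (fun i j => pvSd friends gifts i j k)
    (fun i => by simp only [pvSd]; rw [if_neg (by rintro ⟨h, -⟩; omega)])
  rw [hN] at hkn ⊢
  rw [← hpair]
  have hinner : ∀ i ∈ PySem.List.pyRange 0 ((friends.length : Nat) : Int),
      ((PySem.List.pyRange 0 ((friends.length : Nat) : Int)).map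
        (fun j => pvSd friends gifts i j k)).sum
      = if pvScore friends gifts i < pvScore friends gifts k then (1 : Int) else 0 := by
    intro i _
    unfold pvSd
    exact pv_sum_ite_eq _ k (fun j => pvScore friends gifts i < pvScore friends gifts j) hk0 hkn
  rw [List.map_congr_left hinner]
  rw [pv_sum_map_ite]

-- ---- the correction fold ----
lemma pv_corr_len (friends gifts : List String) :
    ∀ (w : List Int) (p : Int × Int),
      (pvCorrStep (pvF friends gifts)
        (fun i j => (pvStB friends gifts).1.getD (i, j) 0) w p).length = w.length := by
  intro w p
  unfold pvCorrStep
  dsimp only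
  split_ifs <;> simp [PySem.List.length_pySetD]

lemma pv_corr_step (friends gifts : List String) (hpre : Pre_solution friends gifts)
    (w : List Int) (p : Int × Int) (k : Int)
    (hw : w.length = friends.length) (hp : p ∈ pvP friends gifts)
    (hk0 : 0 ≤ k) (hkn : k < pvN friends) :
    PySem.List.pyGetD (pvCorrStep (pvF friends gifts)
        (fun i j => (pvStB friends gifts).1.getD (i, j) 0) w p) k 0
      = PySem.List.pyGetD w k 0 + pvDC friends gifts p k := by
  obtain ⟨ha0, hab, hbn⟩ := pv_P_bound friends gifts hpre p hp
  have hb0 : (0 : Int) ≤ p.2 := by omega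
  have han : p.1 < pvN friends := by omega
  have hfa := pv_scoreB_char friends gifts hpre p.1 ha0 han
  have hfb := pv_scoreB_char friends gifts hpre p.2 hb0 hbn
  have hcab := pv_cnt_char friends gifts p.1 p.2
  have hcba := pv_cnt_char friends gifts p.2 p.1
  set sa := pvScore friends gifts p.1 with hsa
  set sb := pvScore friends gifts p.2 with hsb
  set cab := pvC friends gifts p.1 p.2 with hcab'
  set cba := pvC friends gifts p.2 p.1 with hcba'
  have hset : ∀ (v : List Int) (a : Int), 0 ≤ a → a < pvN friends → v.length = friends.length →
      ∀ (z : Int), PySem.List.pyGetD (PySem.List.pySetD v a z) k 0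
        = if k = a then z else PySem.List.pyGetD v k 0 := by
    intro v a ha0' han' hv z
    exact pv_pyGetD_pySetD v a k z 0 ha0' hk0 (by rw [hv]; exact_mod_cast hkn)
  unfold pvCorrStep
  dsimp only
  simp only [hfa, hfb, hcab, hcba]
  set w1 := (if sb < sa then PySem.List.pySetD w p.1 (PySem.List.pyGetD w p.1 0 - 1)
      else if sa < sb then PySem.List.pySetD w p.2 (PySem.List.pyGetD w p.2 0 - 1)
      else w) with hw1
  have hlen1 : w1.length = friends.length := by
    rw [hw1]; split_ifs <;> simp [PySem.List.length_pySetD, hw]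
  have h1 : PySem.List.pyGetD w1 k 0 = PySem.List.pyGetD w k 0
      - (if sa < sb ∧ p.2 = k then (1 : Int) else 0)
      - (if sb < sa ∧ p.1 = k then (1 : Int) else 0) := by
    rw [hw1]
    by_cases hc1 : sb < sa
    · rw [if_pos hc1, hset w p.1 ha0 han hw _]
      have hXno : ¬ (sa < sb ∧ p.2 = k) := by rintro ⟨h, -⟩; omega
      by_cases hk1 : k = p.1
      · subst hk1
        have hYyes : sb < sa ∧ p.1 = p.1 := ⟨hc1, rfl⟩
        rw [if_pos rfl, if_neg hXno, if_pos hYyes]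
        ring
      · have hYno : ¬ (sb < sa ∧ p.1 = k) := by rintro ⟨-, h⟩; exact hk1 h.symm
        rw [if_neg hk1, if_neg hXno, if_neg hYno]
        ring
    · rw [if_neg hc1]
      have hYno : ¬ (sb < sa ∧ p.1 = k) := by rintro ⟨h, -⟩; omega
      by_cases hc2 : sa < sb
      · rw [if_pos hc2, hset w p.2 hb0 hbn hw _]
        by_cases hk2 : k = p.2
        · subst hk2
          have hXyes : sa < sb ∧ p.2 = p.2 := ⟨hc2, rfl⟩
          rw [if_pos rfl, if_pos hXyes, if_neg hYno]
          ring
        · have hXno : ¬ (sa < sb ∧ p.2 = k) := by rintro ⟨-, h⟩; exact hk2 h.symm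
          rw [if_neg hk2, if_neg hXno, if_neg hYno]
          ring
      · have hXno : ¬ (sa < sb ∧ p.2 = k) := by rintro ⟨h, -⟩; omega
        rw [if_neg hc2, if_neg hXno, if_neg hYno]
        ring
  have h2 : PySem.List.pyGetD
      (if cba < cab then PySem.List.pySetD w1 p.1 (PySem.List.pyGetD w1 p.1 0 + 1)
       else if cab < cba then PySem.List.pySetD w1 p.2 (PySem.List.pyGetD w1 p.2 0 + 1)
       else if sb < sa then PySem.List.pySetD w1 p.1 (PySem.List.pyGetD w1 p.1 0 + 1)
       else if sa < sb then PySem.List.pySetD w1 p.2 (PySem.List.pyGetD w1 p.2 0 + 1)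
       else w1) k 0
      = PySem.List.pyGetD w1 k 0
        + (if (cba < cab ∨ (cba = cab ∧ sb < sa)) ∧ p.1 = k then (1 : Int) else 0)
        + (if (cab < cba ∨ (cab = cba ∧ sa < sb)) ∧ p.2 = k then (1 : Int) else 0) := by
    by_cases hc1 : cba < cab
    · rw [if_pos hc1, hset w1 p.1 ha0 han hlen1 _]
      have hBno : ¬ ((cab < cba ∨ (cab = cba ∧ sa < sb)) ∧ p.2 = k) := by
        rintro ⟨h | ⟨h, -⟩, -⟩ <;> omega
      by_cases hk1 : k = p.1
      · subst hk1
        have hAyes : (cba < cab ∨ (cba = cab ∧ sb < sa)) ∧ p.1 = p.1 := ⟨Or.inl hc1, rfl⟩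
        rw [if_pos rfl, if_pos hAyes, if_neg hBno]
        ring
      · have hAno : ¬ ((cba < cab ∨ (cba = cab ∧ sb < sa)) ∧ p.1 = k) := by
          rintro ⟨-, h⟩; exact hk1 h.symm
        rw [if_neg hk1, if_neg hAno, if_neg hBno]
        ring
    · rw [if_neg hc1]
      by_cases hc2 : cab < cba
      · rw [if_pos hc2, hset w1 p.2 hb0 hbn hlen1 _]
        have hAno : ¬ ((cba < cab ∨ (cba = cab ∧ sb < sa)) ∧ p.1 = k) := by
          rintro ⟨h | ⟨h, -⟩, -⟩ <;> omega
        by_cases hk2 : k = p.2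
        · subst hk2
          have hByes : (cab < cba ∨ (cab = cba ∧ sa < sb)) ∧ p.2 = p.2 := ⟨Or.inl hc2, rfl⟩
          rw [if_pos rfl, if_neg hAno, if_pos hByes]
          ring
        · have hBno : ¬ ((cab < cba ∨ (cab = cba ∧ sa < sb)) ∧ p.2 = k) := by
            rintro ⟨-, h⟩; exact hk2 h.symm
          rw [if_neg hk2, if_neg hAno, if_neg hBno]
          ring
      · rw [if_neg hc2]
        have hceq : cab = cba := by omega
        by_cases hc3 : sb < sa
        · rw [if_pos hc3, hset w1 p.1 ha0 han hlen1 _]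
          have hBno : ¬ ((cab < cba ∨ (cab = cba ∧ sa < sb)) ∧ p.2 = k) := by
            rintro ⟨h | ⟨-, h⟩, -⟩ <;> omega
          by_cases hk1 : k = p.1
          · subst hk1
            have hAyes : (cba < cab ∨ (cba = cab ∧ sb < sa)) ∧ p.1 = p.1 :=
              ⟨Or.inr ⟨by omega, hc3⟩, rfl⟩
            rw [if_pos rfl, if_pos hAyes, if_neg hBno]
            ring
          · have hAno : ¬ ((cba < cab ∨ (cba = cab ∧ sb < sa)) ∧ p.1 = k) := by
              rintro ⟨-, h⟩; exact hk1 h.symm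
            rw [if_neg hk1, if_neg hAno, if_neg hBno]
            ring
        · rw [if_neg hc3]
          have hAno : ¬ ((cba < cab ∨ (cba = cab ∧ sb < sa)) ∧ p.1 = k) := by
            rintro ⟨h | ⟨-, h⟩, -⟩ <;> omega
          by_cases hc4 : sa < sb
          · rw [if_pos hc4, hset w1 p.2 hb0 hbn hlen1 _]
            by_cases hk2 : k = p.2
            · subst hk2
              have hByes : (cab < cba ∨ (cab = cba ∧ sa < sb)) ∧ p.2 = p.2 :=
                ⟨Or.inr ⟨hceq, hc4⟩, rfl⟩
              rw [if_pos rfl, if_neg hAno, if_pos hByes]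
              ring
            · have hBno : ¬ ((cab < cba ∨ (cab = cba ∧ sa < sb)) ∧ p.2 = k) := by
                rintro ⟨-, h⟩; exact hk2 h.symm
              rw [if_neg hk2, if_neg hAno, if_neg hBno]
              ring
          · rw [if_neg hc4]
            have hBno : ¬ ((cab < cba ∨ (cab = cba ∧ sa < sb)) ∧ p.2 = k) := by
              rintro ⟨h | ⟨-, h⟩, -⟩ <;> omega
            rw [if_neg hAno, if_neg hBno]
            ring
  rw [h2, h1]
  have hDA1 : pvDA friends gifts p.1 p.2 k
      = if (cab < cba ∨ (cab = cba ∧ sa < sb)) ∧ p.2 = k then (1 : Int) else 0 := by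
    unfold pvDA
    rw [← hcab', ← hcba', ← hsa, ← hsb]
    by_cases h : (cab < cba ∨ (cab = cba ∧ sa < sb)) ∧ p.2 = k
    · rw [if_pos h, if_pos ⟨by omega, h.1, h.2⟩]
    · rw [if_neg h, if_neg (by rintro ⟨-, h1, h2⟩; exact h ⟨h1, h2⟩)]
  have hDA2 : pvDA friends gifts p.2 p.1 k
      = if (cba < cab ∨ (cba = cab ∧ sb < sa)) ∧ p.1 = k then (1 : Int) else 0 := by
    unfold pvDA
    rw [← hcab', ← hcba', ← hsa, ← hsb]
    by_cases h : (cba < cab ∨ (cba = cab ∧ sb < sa)) ∧ p.1 = k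
    · rw [if_pos h, if_pos ⟨by omega, h.1, h.2⟩]
    · rw [if_neg h, if_neg (by rintro ⟨-, h1, h2⟩; exact h ⟨h1, h2⟩)]
  have hSd1 : pvSd friends gifts p.1 p.2 k = if sa < sb ∧ p.2 = k then (1 : Int) else 0 := by
    unfold pvSd
    rw [← hsa, ← hsb]
  have hSd2 : pvSd friends gifts p.2 p.1 k = if sb < sa ∧ p.1 = k then (1 : Int) else 0 := by
    unfold pvSd
    rw [← hsa, ← hsb]
  unfold pvDC
  rw [hDA1, hDA2, hSd1, hSd2]
  ring

lemma pv_winsB_len (friends gifts : List String) :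
    (pvWinsB friends gifts).length = friends.length := by
  unfold pvWinsB
  rw [pv_foldl_len _ (pv_corr_len friends gifts)]
  exact pv_rk_len friends gifts

lemma pv_winsB_char (friends gifts : List String) (hpre : Pre_solution friends gifts)
    (k : Int) (hk0 : 0 ≤ k) (hkn : k < pvN friends) :
    PySem.List.pyGetD (pvWinsB friends gifts) k 0
      = PySem.List.pyGetD (pvRk friends gifts).1 k 0
        + ((pvP friends gifts).map (fun p => pvDC friends gifts p k)).sum := by
  unfold pvWinsB
  exact pv_foldl_delta friends.length _ (fun p k => pvDC friends gifts p k)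
    (pv_corr_len friends gifts) (pvP friends gifts)
    (fun w p k' hw hp hk0' hkn' =>
      pv_corr_step friends gifts hpre w p k' hw hp hk0' (by exact_mod_cast hkn'))
    (pvRk friends gifts).1 k (pv_rk_len friends gifts) hk0 (by exact_mod_cast hkn)

-- ---- sum over the exchanged-pair set = sum over all i<j pairs ----
def pvPairs (friends : List String) : List (Int × Int) :=
  (PySem.List.pyRange 0 (pvN friends)).flatMap
    (fun i => (PySem.List.pyRange (i + 1) (pvN friends)).map (fun j => (i, j)))

lemma pv_mem_pairs (friends : List String) (p : Int × Int) :
    p ∈ pvPairs friends ↔ 0 ≤ p.1 ∧ p.1 < p.2 ∧ p.2 < pvN friends := by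
  unfold pvPairs
  rw [List.mem_flatMap]
  constructor
  · rintro ⟨i, hi, hp⟩
    rw [List.mem_map] at hp
    obtain ⟨j, hj, rfl⟩ := hp
    rw [PySem.List.mem_pyRange_one] at hi hj
    exact ⟨hi.1, by omega, hj.2⟩
  · rintro ⟨h1, h2, h3⟩
    refine ⟨p.1, PySem.List.mem_pyRange_one.mpr ⟨h1, by omega⟩, ?_⟩
    rw [List.mem_map]
    exact ⟨p.2, PySem.List.mem_pyRange_one.mpr ⟨by omega, h3⟩, rfl⟩

lemma pv_pairs_nodup (friends : List String) : (pvPairs friends).Nodup := by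
  unfold pvPairs
  rw [List.nodup_flatMap]
  constructor
  · intro i _
    exact (PySem.List.nodup_pyRange_one _ _).map
      (fun a b h => by injection h)
  · refine (PySem.List.pairwise_lt_pyRange_one 0 (pvN friends)).imp ?_
    intro a b hab x hxa hxb
    rw [List.mem_map] at hxa hxb
    obtain ⟨j1, -, rfl⟩ := hxa
    obtain ⟨j2, -, h⟩ := hxb
    injection h with h1 h2
    omega

lemma pv_sum_subset (L M : List (Int × Int)) (g : Int × Int → Int)
    (hL : L.Nodup) (hM : M.Nodup) (hsub : ∀ x ∈ M, x ∈ L)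
    (hz : ∀ x ∈ L, x ∉ M → g x = 0) :
    (L.map g).sum = (M.map g).sum := by
  have hfil : ∀ (L' : List (Int × Int)), (∀ x ∈ L', x ∉ M → g x = 0) →
      (L'.map g).sum = ((L'.filter (fun x => decide (x ∈ M))).map g).sum := by
    intro L'
    induction L' with
    | nil => intro _; rfl
    | cons x L' ih =>
      intro hz'
      by_cases hx : x ∈ M
      · rw [List.filter_cons_of_pos (by simpa using hx)]
        simp only [List.map_cons, List.sum_cons]
        rw [ih (fun y hy hyn => hz' y (List.mem_cons_of_mem _ hy) hyn)]
      · rw [List.filter_cons_of_neg (by simpa using hx)]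
        simp only [List.map_cons, List.sum_cons]
        rw [hz' x List.mem_cons_self hx,
          ih (fun y hy hyn => hz' y (List.mem_cons_of_mem _ hy) hyn)]
        ring
  rw [hfil L hz]
  have hperm : (L.filter (fun x => decide (x ∈ M))).Perm M := by
    rw [List.perm_ext_iff_of_nodup (hL.filter _) hM]
    intro a
    rw [List.mem_filter]
    constructor
    · rintro ⟨-, h⟩
      simpa using h
    · intro h
      exact ⟨hsub a h, by simpa using h⟩
  exact (hperm.map g).sum_eq

lemma pv_corr_sum (friends gifts : List String) (hpre : Pre_solution friends gifts) (k : Int) :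
    ((PySem.List.pyRange 0 (pvN friends)).map (fun i =>
        ((PySem.List.pyRange (i + 1) (pvN friends)).map
          (fun j => pvDC friends gifts (i, j) k)).sum)).sum
      = ((pvP friends gifts).map (fun p => pvDC friends gifts p k)).sum := by
  have hflat : ((PySem.List.pyRange 0 (pvN friends)).map (fun i =>
        ((PySem.List.pyRange (i + 1) (pvN friends)).map
          (fun j => pvDC friends gifts (i, j) k)).sum)).sum
      = ((pvPairs friends).map (fun p => pvDC friends gifts p k)).sum := by
    unfold pvPairs
    rw [List.map_flatMap, pv_sum_flatMap]
    congr 1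
    apply List.map_congr_left
    intro i _
    rw [List.map_map]
    rfl
  rw [hflat]
  apply pv_sum_subset
  · exact pv_pairs_nodup friends
  · exact pv_P_nodup friends gifts
  · intro p hp
    rw [pv_mem_pairs]
    exact pv_P_bound friends gifts hpre p hp
  · intro p hp hnp
    rw [pv_mem_pairs] at hp
    obtain ⟨h1, h2, h3⟩ := hp
    have hz := pv_notin_P_zero friends gifts p.1 p.2 h2 (by
      intro hmem
      exact hnp (by simpa using hmem))
    unfold pvDC pvDA pvSd
    rw [hz.1, hz.2]
    split_ifs <;> omega

-- ---- final assembly ----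
lemma pv_expect_eq (friends gifts : List String) (hpre : Pre_solution friends gifts) :
    pvExpectA friends gifts = pvWinsB friends gifts := by
  apply List.ext_getElem (by rw [pv_expectA_len, pv_winsB_len])
  intro k hk1 hk2
  have hkf : k < friends.length := by rw [← pv_expectA_len friends gifts]; exact hk1
  have hk0 : (0 : Int) ≤ (k : Int) := by positivity
  have hkn : ((k : Nat) : Int) < pvN friends := by
    unfold pvN
    exact_mod_cast hkf
  have eA : (pvExpectA friends gifts)[k] = PySem.List.pyGetD (pvExpectA friends gifts) (k : Int) 0 := by
    rw [PySem.List.pyGetD_eq_getElem _ _ hk0 (by exact_mod_cast hkf.trans_eq (pv_expectA_len friends gifts).symm)]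
    simp
  have eB : (pvWinsB friends gifts)[k] = PySem.List.pyGetD (pvWinsB friends gifts) (k : Int) 0 := by
    rw [PySem.List.pyGetD_eq_getElem _ _ hk0 (by exact_mod_cast hkf.trans_eq (pv_winsB_len friends gifts).symm)]
    simp
  rw [eA, eB]
  rw [pv_expectA_char friends gifts hpre (k : Int) hk0 hkn]
  rw [pv_winsB_char friends gifts hpre (k : Int) hk0 hkn]
  rw [pv_rk_char friends gifts hpre (k : Int) hk0 hkn]
  rw [pv_bulk_sum friends gifts (k : Int) hk0 hkn]
  rw [← pv_corr_sum friends gifts hpre (k : Int)]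
  have hd : ∀ i : Int, pvDA friends gifts i i (k : Int) = 0 := by
    intro i
    unfold pvDA
    exact if_neg (fun hcon => hcon.1 rfl)
  rw [show pvN friends = ((friends.length : Nat) : Int) from rfl]
  rw [pv_pair_sum friends.length (fun i j => pvDA friends gifts i j (k : Int)) hd]
  rw [← PySem.List.sum_map_add_int]
  congr 1
  apply List.map_congr_left
  intro i _
  rw [← PySem.List.sum_map_add_int]
  congr 1
  apply List.map_congr_left
  intro j _
  unfold pvDC
  dsimp only
  ring

-- ===== VERDICT (by name: the statement is the Claim_ definition above) =====
theorem solution_spec : Claim_equal_solution := by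
  intro friends gifts _ hpre
  show solution friends gifts = solution_alt friends gifts
  rw [pv_solution_eq, pv_solution_alt_eq, pv_expect_eq friends gifts hpre]
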